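-- pv_equiv track=rewrite | github.com/wohahiha/Hamming-BCH-McEliece | hamming_mceliece/hamming_code.py | hamming15_syndrome
-- ===== SOURCE A (Python) =====
-- HAMMING_N = 15
--
-- def hamming15_syndrome(r15: int) -> int:
--     s = 0
--     for j in range(4):
--         val = 0
--         for i in range(1, HAMMING_N + 1):
--             if i & (1 << j):
--                 val ^= (r15 >> (i - 1)) & 1
--         s |= val << j
--     return s
-- ===== SOURCE B (Python) =====
-- HAMMING_N = 15
--
-- def hamming15_syndrome(r15: int) -> int:
--     s = 0
--     for i in range(1, HAMMING_N + 1):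
--         if (r15 >> (i - 1)) & 1:
--             s ^= i
--     return s
-- ===== Notes on version B (the rewrite author's own statement) =====
-- stated objective: simpler
-- what changed: Replaces the nested per-parity-bit double loop (4 parity bits x all codeword positions) with a single pass over the positions that XORs the position index i into an accumulator whenever the codeword bit at i is set; the syndrome equals the XOR of the set positions' indices, so the per-bit parities are never computed separately.
import Mathlib
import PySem

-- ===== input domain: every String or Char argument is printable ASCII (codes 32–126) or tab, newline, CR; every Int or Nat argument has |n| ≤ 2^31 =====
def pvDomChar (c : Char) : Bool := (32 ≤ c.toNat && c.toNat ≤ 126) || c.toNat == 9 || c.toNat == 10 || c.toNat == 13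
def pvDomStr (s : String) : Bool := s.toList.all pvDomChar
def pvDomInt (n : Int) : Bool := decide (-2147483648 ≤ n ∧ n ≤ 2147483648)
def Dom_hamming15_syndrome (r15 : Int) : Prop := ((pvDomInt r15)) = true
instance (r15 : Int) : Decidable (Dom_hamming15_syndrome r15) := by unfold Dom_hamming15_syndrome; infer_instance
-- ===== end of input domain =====

-- B replaces A's nested 4x15 parity-bit loop by a single pass that XORs the index of every
-- set codeword bit into the accumulator (simpler; same exact value).


-- ===== PORT A =====
-- literal port of A: for j in range(4): val = parity over i in 1..15 of bit i-1 where bit j of i is set; s |= val << j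
def hamming15_syndrome (r15 : Int) : Int :=
  (PySem.List.pyRange 0 4 1).foldl (fun s j =>
    let val := (PySem.List.pyRange 1 16 1).foldl (fun val i =>
      if PySem.Int.band i ((1:Int) <<< j.toNat) ≠ 0 then
        PySem.Int.bxor val (PySem.Int.band (r15 >>> (i - 1).toNat) 1)
      else val) 0
    PySem.Int.bor s (val <<< j.toNat)) 0

-- ===== PORT B =====
-- literal port of B: one pass over the 15 positions, s ^= i for every set codeword bit
def hamming15_syndrome_alt (r15 : Int) : Int :=
  (PySem.List.pyRange 1 16 1).foldl (fun s i =>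
    if PySem.Int.band (r15 >>> (i - 1).toNat) 1 ≠ 0 then PySem.Int.bxor s i else s) 0

-- ===== PRECONDITION & SPEC =====
def Spec_hamming15_syndrome (r15 : Int) (out : Int) : Prop := out = hamming15_syndrome_alt r15
instance (r15 : Int) (out : Int) : Decidable (Spec_hamming15_syndrome r15 out) := by unfold Spec_hamming15_syndrome; infer_instance

-- ===== CLAIM (what is proved, stated in full; the proofs are below) =====
def Claim_equal_hamming15_syndrome : Prop := ∀ (r15 : Int), Dom_hamming15_syndrome r15 → Spec_hamming15_syndrome r15 (hamming15_syndrome r15)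

-- ===== LEMMAS AND PROOFS =====

-- B's loop body (the explicit instances pin the same elaboration as the port's lambda)
def pvFB (r : Int) : Int → Int → Int := fun s i =>
  if PySem.Int.band (r >>> (((i - 1).toNat : Int))) 1 ≠ 0 then PySem.Int.bxor s i else s

-- A's inner-loop body for the parity bit with mask m = 1 << j
def pvFI (r m : Int) : Int → Int → Int := fun val i =>
  if PySem.Int.band i m ≠ 0 then
    PySem.Int.bxor val (PySem.Int.band (r >>> (((i - 1).toNat : Int))) 1)
  else val

-- Mathlib's Int-exponent shift agrees with core's Nat-exponent shift
lemma pv_srr (r : Int) (n : Nat) : r >>> ((n : Int)) = r >>> n := by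
  cases r <;> cases n <;> rfl

-- one step of the coupled invariant: XOR-ing a position 1 ≤ i < 16 into s flips exactly the
-- parity accumulators of the bit positions set in i, and keeps 0 ≤ s < 16
set_option maxHeartbeats 1600000 in
lemma pv_step (i s b : Int) (hi : 1 ≤ i) (hi' : i < 16) (hs : 0 ≤ s) (hs' : s < 16)
    (hb : b = 0 ∨ b = 1) :
    (0 ≤ (if b ≠ 0 then PySem.Int.bxor s i else s)) ∧
    ((if b ≠ 0 then PySem.Int.bxor s i else s) < 16) ∧
    ((if PySem.Int.band i 1 ≠ 0 then PySem.Int.bxor (PySem.Int.band s 1) b else PySem.Int.band s 1)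
       = PySem.Int.band (if b ≠ 0 then PySem.Int.bxor s i else s) 1) ∧
    ((if PySem.Int.band i 2 ≠ 0 then PySem.Int.bxor (PySem.Int.band (s >>> (1:Nat)) 1) b else PySem.Int.band (s >>> (1:Nat)) 1)
       = PySem.Int.band ((if b ≠ 0 then PySem.Int.bxor s i else s) >>> (1:Nat)) 1) ∧
    ((if PySem.Int.band i 4 ≠ 0 then PySem.Int.bxor (PySem.Int.band (s >>> (2:Nat)) 1) b else PySem.Int.band (s >>> (2:Nat)) 1)
       = PySem.Int.band ((if b ≠ 0 then PySem.Int.bxor s i else s) >>> (2:Nat)) 1) ∧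
    ((if PySem.Int.band i 8 ≠ 0 then PySem.Int.bxor (PySem.Int.band (s >>> (3:Nat)) 1) b else PySem.Int.band (s >>> (3:Nat)) 1)
       = PySem.Int.band ((if b ≠ 0 then PySem.Int.bxor s i else s) >>> (3:Nat)) 1) := by
  rcases hb with rfl | rfl <;> interval_cases i <;> interval_cases s <;> decide

-- the codeword bit read at any position is 0 or 1
lemma pv_bit01 (r x : Int) :
    PySem.Int.band (r >>> x) 1 = 0 ∨ PySem.Int.band (r >>> x) 1 = 1 := by
  rw [PySem.Int.band_one]
  have h1 := PySem.Int.mod_nonneg (a := r >>> x) (b := 2) (by norm_num)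
  have h2 := PySem.Int.mod_lt (a := r >>> x) (b := 2) (by norm_num)
  omega

-- coupled invariant over any list of positions in [1, 16): the four parity folds of A
-- compute exactly the four low bits of B's XOR fold
lemma pv_inv (r : Int) (l : List Int) (h : ∀ i ∈ l, 1 ≤ i ∧ i < 16) :
    ∀ s v0 v1 v2 v3 : Int, 0 ≤ s → s < 16 →
    v0 = PySem.Int.band s 1 → v1 = PySem.Int.band (s >>> (1:Nat)) 1 →
    v2 = PySem.Int.band (s >>> (2:Nat)) 1 → v3 = PySem.Int.band (s >>> (3:Nat)) 1 →
    (0 ≤ l.foldl (pvFB r) s ∧ l.foldl (pvFB r) s < 16) ∧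
    l.foldl (pvFI r 1) v0 = PySem.Int.band (l.foldl (pvFB r) s) 1 ∧
    l.foldl (pvFI r 2) v1 = PySem.Int.band (l.foldl (pvFB r) s >>> (1:Nat)) 1 ∧
    l.foldl (pvFI r 4) v2 = PySem.Int.band (l.foldl (pvFB r) s >>> (2:Nat)) 1 ∧
    l.foldl (pvFI r 8) v3 = PySem.Int.band (l.foldl (pvFB r) s >>> (3:Nat)) 1 := by
  induction l with
  | nil =>
    intro s v0 v1 v2 v3 hs hs' h0 h1 h2 h3
    simp only [List.foldl_nil]
    exact ⟨⟨hs, hs'⟩, h0, h1, h2, h3⟩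
  | cons i t ih =>
    intro s v0 v1 v2 v3 hs hs' h0 h1 h2 h3
    obtain ⟨hi1, hi2⟩ := h i List.mem_cons_self
    have S := pv_step i s (PySem.Int.band (r >>> (((i - 1).toNat : Int))) 1) hi1 hi2 hs hs'
      (pv_bit01 r (((i - 1).toNat : Int)))
    obtain ⟨S0, S1, S2, S3, S4, S5⟩ := S
    simp only [List.foldl_cons]
    subst h0 h1 h2 h3
    exact ih (fun x hx => h x (List.mem_cons_of_mem _ hx)) _ _ _ _ _ S0 S1 S2 S3 S4 S5

-- recombining the four extracted bits of 0 ≤ g < 16 gives back g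
set_option maxHeartbeats 800000 in
lemma pv_final (g : Int) (h0 : 0 ≤ g) (h1 : g < 16) :
    PySem.Int.bor (PySem.Int.bor (PySem.Int.bor (PySem.Int.bor 0 ((PySem.Int.band g 1) <<< (((0:Int).toNat : Int))))
      ((PySem.Int.band (g >>> (1:Nat)) 1) <<< (((1:Int).toNat : Int))))
      ((PySem.Int.band (g >>> (2:Nat)) 1) <<< (((2:Int).toNat : Int))))
      ((PySem.Int.band (g >>> (3:Nat)) 1) <<< (((3:Int).toNat : Int))) = g := by
  interval_cases g <;> decide

-- A unfolded: the outer loop is literally j = 0,1,2,3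
lemma pv_A_shape (r : Int) :
    hamming15_syndrome r =
    PySem.Int.bor (PySem.Int.bor (PySem.Int.bor (PySem.Int.bor 0
      (((PySem.List.pyRange 1 16 1).foldl (pvFI r ((1:Int) <<< (((0:Int).toNat : Int)))) 0) <<< (((0:Int).toNat : Int))))
      (((PySem.List.pyRange 1 16 1).foldl (pvFI r ((1:Int) <<< (((1:Int).toNat : Int)))) 0) <<< (((1:Int).toNat : Int))))
      (((PySem.List.pyRange 1 16 1).foldl (pvFI r ((1:Int) <<< (((2:Int).toNat : Int)))) 0) <<< (((2:Int).toNat : Int))))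
      (((PySem.List.pyRange 1 16 1).foldl (pvFI r ((1:Int) <<< (((3:Int).toNat : Int)))) 0) <<< (((3:Int).toNat : Int))) := by
  have h4 : PySem.List.pyRange 0 4 1 = [(0:Int),1,2,3] := by decide
  have hf : ∀ m : Int, (fun (val i : Int) =>
      if PySem.Int.band i m ≠ 0 then
        PySem.Int.bxor val (PySem.Int.band (@HShiftRight.hShiftRight Int Nat Int Int.instHShiftRightNat r (i - 1).toNat) 1)
      else val) = pvFI r m := fun m => funext fun val => funext fun i => by
    rw [pvFI, ← pv_srr r (i - 1).toNat]
  simp only [hamming15_syndrome, h4, List.foldl_cons, List.foldl_nil, hf]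

lemma pv_B_shape (r : Int) :
    hamming15_syndrome_alt r = (PySem.List.pyRange 1 16 1).foldl (pvFB r) 0 := rfl

-- ===== VERDICT (by name: the statement is the Claim_ definition above) =====
theorem hamming15_syndrome_spec : Claim_equal_hamming15_syndrome := by
  intro r _
  unfold Spec_hamming15_syndrome
  have hmem : ∀ i ∈ PySem.List.pyRange 1 16 1, 1 ≤ i ∧ i < 16 := by
    intro i hi
    rw [PySem.List.mem_pyRange_one] at hi
    exact hi
  have H := pv_inv r (PySem.List.pyRange 1 16 1) hmem 0 0 0 0 0 (by norm_num) (by norm_num)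
    (by decide) (by decide) (by decide) (by decide)
  obtain ⟨⟨hg0, hg1⟩, e0, e1, e2, e3⟩ := H
  rw [pv_A_shape, pv_B_shape]
  simp only [show ((1:Int) <<< (((0:Int).toNat : Int))) = 1 from by decide,
             show ((1:Int) <<< (((1:Int).toNat : Int))) = 2 from by decide,
             show ((1:Int) <<< (((2:Int).toNat : Int))) = 4 from by decide,
             show ((1:Int) <<< (((3:Int).toNat : Int))) = 8 from by decide]
  rw [e0, e1, e2, e3]
  exact pv_final _ hg0 hg1
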